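-- pv_equiv track=rewrite | github.com/Miyayx/CMCC | feature_getter.py | get_common_labels
-- ===== SOURCE A (Python) =====
-- def get_common_labels(label_list):
--     labels = []
--     label_c = {}
--
--     for sample_sl in label_list:
--         for sample, ls in sample_sl.items():
--             for label in ls:
--                 label_c[label] = label_c.get(label, 0) + 1
--
--     labels = [k for k,v in label_c.items() if v > 1]
--
--     return labels
-- ===== SOURCE B (Python) =====
-- def get_common_labels(label_list):
--     # Stage 1: flatten all labels into one stream (comprehension).
--     flat = [label for sample_sl in label_list for ls in sample_sl.values() for label in ls]
--     # Stage 2: sort the stream; a label occurs more than once iff it has an equal neighbour.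
--     srt = sorted(flat)
--     dup = {a for a, b in zip(srt, srt[1:]) if a == b}
--     # Stage 3: emit duplicates in first-appearance order.
--     out = []
--     seen = set()
--     for label in flat:
--         if label in dup and label not in seen:
--             out.append(label)
--             seen.add(label)
--     return out
-- ===== Notes on version B (the rewrite author's own statement) =====
-- stated objective: alternative
-- what changed: Replaces A's single triple-nested counting loop with staged passes: flatten all labels into one stream via a comprehension, sort the stream and mark labels having an equal sorted neighbour as duplicates, then emit duplicates in first-appearance order in a final scan.
import Mathlib
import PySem

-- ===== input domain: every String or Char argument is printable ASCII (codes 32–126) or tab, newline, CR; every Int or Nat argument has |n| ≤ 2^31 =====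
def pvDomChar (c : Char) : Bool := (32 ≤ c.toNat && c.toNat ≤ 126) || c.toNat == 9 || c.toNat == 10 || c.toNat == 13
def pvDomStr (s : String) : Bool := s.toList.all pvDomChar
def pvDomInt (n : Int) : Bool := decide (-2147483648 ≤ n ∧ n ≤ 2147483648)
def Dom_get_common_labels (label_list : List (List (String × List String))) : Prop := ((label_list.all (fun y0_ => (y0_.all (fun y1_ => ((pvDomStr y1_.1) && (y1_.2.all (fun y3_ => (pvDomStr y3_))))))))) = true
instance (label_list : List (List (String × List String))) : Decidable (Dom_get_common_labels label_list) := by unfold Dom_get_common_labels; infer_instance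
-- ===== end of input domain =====

-- B replaces the counting dict by staged passes: flatten the label stream, sort it and
-- collect labels with an equal neighbour, then emit those in first-appearance order.
-- Objective: alternative (sort-then-scan instead of occurrence counting; not faster).

-- ===== PORT A =====
def get_common_labels (label_list : List (List (String × List String))) : List String :=
  let label_c : PySem.Dict String Int :=
    label_list.foldl (fun label_c sample_sl =>
      sample_sl.foldl (fun label_c sls =>
        sls.2.foldl (fun label_c label =>
          label_c.insert label (label_c.getD label 0 + 1)) label_c) label_c)
      PySem.Dict.empty
  (label_c.items.filter (fun p => decide (p.2 > 1))).map (·.1)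

-- ===== PORT B =====
def get_common_labels_alt (label_list : List (List (String × List String))) : List String :=
  -- flat = [label for sample_sl in label_list for ls in sample_sl.values() for label in ls]
  let flat : List String := label_list.flatMap (fun sample_sl => sample_sl.flatMap (·.2))
  -- srt = sorted(flat)
  let srt := PySem.List.sorted flat (fun x => x) false
  -- dup = {a for a, b in zip(srt, srt[1:]) if a == b}
  let dup : PySem.Set String :=
    PySem.Set.ofList (((srt.zip (PySem.List.slice srt (some 1) none)).filter
      (fun p => p.1 == p.2)).map (·.1))
  -- out/seen loop
  let st := flat.foldl (fun st label =>
      if PySem.Set.contains dup label && !(PySem.Set.contains st.2 label)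
      then (st.1 ++ [label], PySem.Set.add st.2 label) else st)
    (([] : List String), (PySem.Set.empty : PySem.Set String))
  st.1

-- ===== PRECONDITION & SPEC =====
def Spec_get_common_labels (label_list : List (List (String × List String))) (out : List String) : Prop := out = get_common_labels_alt label_list
instance (label_list : List (List (String × List String))) (out : List String) : Decidable (Spec_get_common_labels label_list out) := by unfold Spec_get_common_labels; infer_instance

-- ===== CLAIM (what is proved, stated in full; the proofs are below) =====
def Claim_equal_get_common_labels : Prop := ∀ (label_list : List (List (String × List String))), Dom_get_common_labels label_list → Spec_get_common_labels label_list (get_common_labels label_list)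

-- ===== LEMMAS AND PROOFS =====

-- the flat stream of labels both programs traverse
def pvFlat (label_list : List (List (String × List String))) : List String :=
  label_list.flatMap (fun sl => sl.flatMap (·.2))

theorem pv_foldl_flatMap {α β σ : Type} (g : β → List α) (f : σ → α → σ) (l : List β) (s : σ) :
    l.foldl (fun s b => (g b).foldl f s) s = (l.flatMap g).foldl f s := by
  induction l generalizing s with
  | nil => rfl
  | cons b l ih => simp [List.flatMap_cons, List.foldl_append, ih]

-- A over the flat stream is the counter filter
theorem pvA_flat (label_list : List (List (String × List String))) :
    get_common_labels label_list =
      ((PySem.Dict.counter (pvFlat label_list)).items.filter (fun p => decide (p.2 > 1))).map (·.1) := by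
  unfold get_common_labels pvFlat
  rw [show (fun (label_c : PySem.Dict String Int) (sample_sl : List (String × List String)) =>
        sample_sl.foldl (fun label_c sls =>
          sls.2.foldl (fun label_c label => label_c.insert label (label_c.getD label 0 + 1)) label_c) label_c)
      = fun label_c sample_sl =>
        (sample_sl.flatMap (·.2)).foldl (fun label_c label => label_c.insert label (label_c.getD label 0 + 1)) label_c
      from funext fun _ => funext fun sl => pv_foldl_flatMap _ _ sl _]
  rw [pv_foldl_flatMap, PySem.Dict.foldl_insert_getD_add_one_eq_counter]

-- adjacent-equal pairs of a (≤)-sorted list name exactly the labels of count ≥ 2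
theorem pvAdj (l : List String) (h : l.Pairwise (· ≤ ·)) (k : String) :
    k ∈ ((l.zip l.tail).filter (fun p => p.1 == p.2)).map (·.1) ↔ 2 ≤ l.count k := by
  induction l with
  | nil => simp
  | cons a t ih =>
    cases t with
    | nil =>
      simp [List.count_cons]
      split_ifs <;> omega
    | cons b t2 =>
      have hab : a ≤ b := (List.pairwise_cons.mp h).1 b (by simp)
      have hpt : (b :: t2).Pairwise (· ≤ ·) := (List.pairwise_cons.mp h).2
      have hbt : ∀ y ∈ t2, b ≤ y := fun y hy => (List.pairwise_cons.mp hpt).1 y hy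
      have ihb := ih hpt
      have hzip : (a :: b :: t2).zip (a :: b :: t2).tail
          = (a, b) :: (b :: t2).zip (b :: t2).tail := by simp
      rw [hzip]
      by_cases heq : a = b
      · rw [List.filter_cons_of_pos (by simp [heq])]
        rw [List.map_cons]
        simp only [List.mem_cons]
        constructor
        · rintro (hk | hm)
          · subst hk
            simp [heq]
          · have := ihb.mp hm
            simp [List.count_cons] at this ⊢
            omega
        · intro hc
          by_cases hak : a = k
          · exact Or.inl hak.symm
          · refine Or.inr (ihb.mpr ?_)
            simp [List.count_cons, hak] at hc ⊢
            omega
      · rw [List.filter_cons_of_neg (by simp [heq])]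
        rw [ihb]
        constructor
        · intro h2
          simp [List.count_cons] at h2 ⊢
          omega
        · intro hc
          by_cases hak : a = k
          · exfalso
            have h1 : 1 ≤ (b :: t2).count k := by
              simp [List.count_cons, hak] at hc ⊢
              omega
            have hmem : k ∈ b :: t2 := List.count_pos_iff.mp (by omega)
            rcases List.mem_cons.mp hmem with h' | h'
            · exact heq (hak.trans h')
            · have hbk : b ≤ k := hbt k h'
              have hkb : k ≤ b := hak ▸ hab
              exact heq (hak.trans (le_antisymm hkb hbk))
          · simp [List.count_cons, hak] at hc ⊢
            omega

-- filtering a set built by add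
theorem pvFilterAdd (s : PySem.Set String) (x : String) (p : String → Bool) :
    (PySem.Set.add s x).filter p = if p x then PySem.Set.add (s.filter p) x else s.filter p := by
  by_cases hx : x ∈ s
  · rw [PySem.Set.add_of_mem hx]
    by_cases hp : p x
    · have : x ∈ s.filter p := List.mem_filter.mpr ⟨hx, hp⟩
      rw [if_pos hp, PySem.Set.add_of_mem this]
    · simp [hp]
  · have : PySem.Set.add s x = s ++ [x] := by simp [PySem.Set.add, hx]
    rw [this, List.filter_append]
    by_cases hp : p x
    · have hxf : x ∉ s.filter p := fun hm => hx (List.mem_filter.mp hm).1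
      simp [hp, PySem.Set.add, hxf]
    · simp [hp]

-- first-occurrence dedup commutes with filter
theorem pvUpdateFilter (p : String → Bool) (xs : List String) (s : PySem.Set String) :
    (PySem.Set.update s xs).filter p = PySem.Set.update (s.filter p) (xs.filter p) := by
  induction xs generalizing s with
  | nil => rfl
  | cons x xs ih =>
    simp only [PySem.Set.update, List.foldl_cons, List.filter_cons]
    rw [show (xs.foldl PySem.Set.add (PySem.Set.add s x)) = PySem.Set.update (PySem.Set.add s x) xs from rfl]
    rw [ih]
    by_cases hp : p x
    · simp [hp, pvFilterAdd, PySem.Set.update]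
    · simp [hp, pvFilterAdd, PySem.Set.update]

-- B's emit loop: out and seen stay equal and collect the dup labels first-seen
theorem pvLoop (dup : PySem.Set String) (xs : List String) (r : PySem.Set String) :
    xs.foldl (fun st label =>
        if PySem.Set.contains dup label && !(PySem.Set.contains st.2 label)
        then (st.1 ++ [label], PySem.Set.add st.2 label) else st) (r, r)
      = (PySem.Set.update r (xs.filter (fun k => PySem.Set.contains dup k)),
         PySem.Set.update r (xs.filter (fun k => PySem.Set.contains dup k))) := by
  induction xs generalizing r with
  | nil => rfl
  | cons x xs ih =>
    simp only [List.foldl_cons, List.filter_cons]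
    by_cases hd : PySem.Set.contains dup x
    · by_cases hr : PySem.Set.contains r x
      · rw [hd, hr]
        simp only [Bool.not_true, Bool.and_false, Bool.false_eq_true, if_false, if_pos]
        rw [show PySem.Set.update r (x :: List.filter (fun k => PySem.Set.contains dup k) xs)
            = PySem.Set.update (PySem.Set.add r x) (List.filter (fun k => PySem.Set.contains dup k) xs) from rfl]
        rw [PySem.Set.add_of_mem ((PySem.Set.contains_iff r x).mp hr)]
        exact ih r
      · have hrf : PySem.Set.contains r x = false := by
          cases hcc : PySem.Set.contains r x with
          | true => exact absurd hcc hr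
          | false => rfl
        have hxm : x ∉ r := fun hm => hr ((PySem.Set.contains_iff r x).mpr hm)
        have hadd : PySem.Set.add r x = r ++ [x] := by simp [PySem.Set.add, hxm]
        rw [hd, hrf]
        simp only [Bool.not_false, Bool.and_true, if_pos]
        rw [show r ++ [x] = PySem.Set.add r x from hadd.symm]
        rw [ih (PySem.Set.add r x)]
        rfl
    · have hdf : PySem.Set.contains dup x = false := by
        cases hcc : PySem.Set.contains dup x with
        | true => exact absurd hcc hd
        | false => rfl
      rw [hdf]
      simp only [Bool.false_and, Bool.false_eq_true, if_false]
      exact ih r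

-- ===== VERDICT (by name: the statement is the Claim_ definition above) =====
theorem get_common_labels_spec : Claim_equal_get_common_labels := by
  intro label_list _
  show get_common_labels label_list = get_common_labels_alt label_list
  rw [pvA_flat]
  unfold get_common_labels_alt
  simp only []
  set xs := pvFlat label_list with hxs
  have hflat : label_list.flatMap (fun sample_sl => sample_sl.flatMap (·.2)) = xs := rfl
  rw [hflat]
  set srt := PySem.List.sorted xs (fun x => x) false with hsrt
  set dup : PySem.Set String :=
    PySem.Set.ofList (((srt.zip (PySem.List.slice srt (some 1) none)).filter
      (fun p => p.1 == p.2)).map (·.1)) with hdup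
  -- B's loop
  rw [show (PySem.Set.empty : PySem.Set String) = ([] : List String) from rfl]
  rw [pvLoop dup xs ([] : PySem.Set String)]
  simp only []
  rw [show PySem.Set.update ([] : PySem.Set String) (xs.filter (fun k => PySem.Set.contains dup k))
      = PySem.Set.ofList (xs.filter (fun k => PySem.Set.contains dup k)) from
    PySem.Set.update_nil_left _]
  -- A's side to a filter over the deduped stream
  rw [PySem.Dict.items_counter, List.filter_map, List.map_map]
  have h1 : ((fun p : String × Int => p.1) ∘ fun k => (k, (xs.count k : Int))) = id := rfl
  rw [h1, List.map_id]
  -- B's side: dedup commutes with filter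
  have hB := pvUpdateFilter (fun k => PySem.Set.contains dup k) xs ([] : PySem.Set String)
  have h0 : (([] : PySem.Set String).filter (fun k => PySem.Set.contains dup k)) = ([] : PySem.Set String) := rfl
  rw [h0, PySem.Set.update_nil_left, PySem.Set.update_nil_left] at hB
  rw [← hB]
  -- pointwise: count > 1 coincides with membership in dup
  apply List.filter_congr
  intro k _
  simp only [Function.comp]
  have hsorted : srt.Pairwise (· ≤ ·) := PySem.List.sorted_pairwise xs (fun x => x) (κ := String)
  have hperm : srt.Perm xs := PySem.List.sorted_perm xs (fun x => x) false
  have htail : PySem.List.slice srt (some 1) none = srt.tail := PySem.List.slice_from_one srt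
  have hmem : PySem.Set.contains dup k
      = decide (k ∈ ((srt.zip srt.tail).filter (fun p => p.1 == p.2)).map (·.1)) := by
    rw [hdup, htail]
    cases hcc : PySem.Set.contains
        (PySem.Set.ofList (((srt.zip srt.tail).filter (fun p => p.1 == p.2)).map (·.1))) k with
    | true =>
      have := (PySem.Set.contains_iff _ k).mp hcc
      rw [PySem.Set.mem_ofList] at this
      simp [this]
    | false =>
      have : k ∉ PySem.Set.ofList (((srt.zip srt.tail).filter (fun p => p.1 == p.2)).map (·.1)) := by
        intro hm
        rw [(PySem.Set.contains_iff _ k).mpr hm] at hcc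
        exact Bool.true_eq_false.mp hcc
      rw [PySem.Set.mem_ofList] at this
      simp [this]
  rw [hmem]
  have hcount : srt.count k = xs.count k := hperm.count_eq k
  rw [show (decide ((xs.count k : Int) > 1)) = decide (2 ≤ xs.count k) by
    apply Bool.coe_iff_coe.mp; simp; omega]
  apply Bool.coe_iff_coe.mp
  simp only [decide_eq_true_iff]
  rw [pvAdj srt hsorted k, hcount]
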